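-- pv_equiv track=rewrite | github.com/libp2p/py-libp2p | libp2p/pubsub/rpc_queue.py | _varint_size
-- ===== SOURCE A (Python) =====
-- def _varint_size(value: int) -> int:
--     """Return the number of bytes needed to encode *value* as a varint."""
--     if value == 0:
--         return 1
--     size = 0
--     while value > 0:
--         size += 1
--         value >>= 7
--     return size
-- ===== SOURCE B (Python) =====
-- def _varint_size(value: int) -> int:
--     """Return the number of bytes needed to encode *value* as a varint."""
--     if value == 0:
--         return 1
--     if value < 0:
--         return 0
--     return (value.bit_length() + 6) // 7
-- ===== Notes on version B (the rewrite author's own statement) =====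
-- stated objective: simpler
-- what changed: Replaces the shift-by-7 counting loop with the closed form ceil(bit_length/7), with the same explicit answers for the zero and negative cases that A's loop produces.
import Mathlib
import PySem

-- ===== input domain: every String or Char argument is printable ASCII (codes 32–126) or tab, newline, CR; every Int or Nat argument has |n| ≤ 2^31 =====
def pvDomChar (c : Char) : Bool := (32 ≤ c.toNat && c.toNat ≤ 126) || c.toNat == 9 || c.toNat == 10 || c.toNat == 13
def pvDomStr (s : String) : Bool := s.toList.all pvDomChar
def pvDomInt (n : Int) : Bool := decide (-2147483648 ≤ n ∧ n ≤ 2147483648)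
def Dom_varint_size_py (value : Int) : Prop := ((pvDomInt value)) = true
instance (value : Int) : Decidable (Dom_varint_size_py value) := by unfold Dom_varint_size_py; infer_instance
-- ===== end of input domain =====

-- B replaces A's shift-by-7 counting loop with the closed form ceil(bit_length/7) (simpler; no iteration).


-- ===== PORT A =====
-- the 'while value > 0: size += 1; value >>= 7' loop; Python's '>>' on int is Lean's '>>>'
def varintLoopA (value : Int) (size : Int) : Int :=
  if 0 < value then varintLoopA (value >>> (7 : Nat)) (size + 1) else size
termination_by value.toNat
decreasing_by
  rename_i h
  have he : value >>> (7 : Nat) = value / 128 := by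
    rw [Int.shiftRight_eq_div_pow]; norm_num
  rw [he]; omega

def varint_size_py (value : Int) : Int :=
  if value = 0 then 1
  else varintLoopA value 0

-- ===== PORT B =====
-- Source B: special cases for 0 and negatives, else (value.bit_length() + 6) // 7
def varint_size_py_alt (value : Int) : Int :=
  if value = 0 then 1
  else if value < 0 then 0
  else PySem.Int.floordiv ((PySem.Int.bitLength value : Int) + 6) 7

-- ===== PRECONDITION & SPEC =====
def Spec_varint_size_py (value : Int) (out : Int) : Prop := out = varint_size_py_alt value
instance (value : Int) (out : Int) : Decidable (Spec_varint_size_py value out) := by unfold Spec_varint_size_py; infer_instance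

-- ===== CLAIM (what is proved, stated in full; the proofs are below) =====
def Claim_equal_varint_size_py : Prop := ∀ (value : Int), Dom_varint_size_py value → Spec_varint_size_py value (varint_size_py value)

-- ===== LEMMAS AND PROOFS =====

-- shifting a nonnegative cast right by 7 is Nat division by 128
theorem shift7_natCast (n : Nat) : ((n : Int) >>> (7 : Nat)) = ((n / 128 : Nat) : Int) := by
  rw [Int.shiftRight_eq_div_pow]; push_cast; norm_num

-- bit length drops by exactly 7 under division by 128 (for n ≥ 128)
theorem bitLength_div128 (n : Nat) (h : 128 ≤ n) :
    PySem.Int.bitLength (n : Int) = PySem.Int.bitLength ((n / 128 : Nat) : Int) + 7 := by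
  have e1 := PySem.Int.bitLength_natCast (m := n) (by omega)
  have e2 := PySem.Int.bitLength_natCast (m := n / 2) (by omega)
  have e3 := PySem.Int.bitLength_natCast (m := n / 2 / 2) (by omega)
  have e4 := PySem.Int.bitLength_natCast (m := n / 2 / 2 / 2) (by omega)
  have e5 := PySem.Int.bitLength_natCast (m := n / 2 / 2 / 2 / 2) (by omega)
  have e6 := PySem.Int.bitLength_natCast (m := n / 2 / 2 / 2 / 2 / 2) (by omega)
  have e7 := PySem.Int.bitLength_natCast (m := n / 2 / 2 / 2 / 2 / 2 / 2) (by omega)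
  have hdiv : n / 2 / 2 / 2 / 2 / 2 / 2 / 2 = n / 128 := by omega
  rw [e1, e2, e3, e4, e5, e6, e7, hdiv]

-- small positive numbers have bit length between 1 and 7
theorem bitLength_small (n : Nat) (h0 : 0 < n) (h : n < 128) :
    1 ≤ PySem.Int.bitLength (n : Int) ∧ PySem.Int.bitLength (n : Int) ≤ 7 := by
  have hlt := PySem.Int.lt_two_pow_bitLength (n : Int)
  have hle := PySem.Int.two_pow_bitLength_le (n : Int) (by exact_mod_cast h0.ne')
  simp only [Int.natAbs_natCast] at hlt hle
  constructor
  · by_contra hc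
    have hb : PySem.Int.bitLength (n : Int) = 0 := by omega
    rw [hb] at hlt; simp at hlt; omega
  · by_contra hc
    have : (2 : Nat) ^ 7 ≤ 2 ^ (PySem.Int.bitLength (n : Int) - 1) :=
      Nat.pow_le_pow_right (by norm_num) (by omega)
    omega

-- loop invariant: for positive n the loop adds exactly ceil(bitLength/7) = (bitLength+6)/7
theorem loopA_eq (n : Nat) (h0 : 0 < n) :
    ∀ s : Int, varintLoopA (n : Int) s = s + (((PySem.Int.bitLength (n : Int) + 6) / 7 : Nat) : Int) := by
  induction n using Nat.strong_induction_on with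
  | _ n ih =>
    intro s
    rw [varintLoopA]
    have hpos : (0 : Int) < n := by exact_mod_cast h0
    rw [if_pos hpos, shift7_natCast]
    by_cases h : n < 128
    · have hz : n / 128 = 0 := Nat.div_eq_of_lt h
      rw [hz]
      rw [varintLoopA, if_neg (by norm_num)]
      have hb := bitLength_small n h0 h
      have he : (PySem.Int.bitLength (n : Int) + 6) / 7 = 1 := by omega
      rw [he]; push_cast; ring
    · have h128 : 128 ≤ n := by omega
      have hlt : n / 128 < n := Nat.div_lt_self h0 (by norm_num)
      have hpos' : 0 < n / 128 := Nat.div_pos h128 (by norm_num)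
      rw [ih (n / 128) hlt hpos' (s + 1), bitLength_div128 n h128]
      have he : (PySem.Int.bitLength ((n / 128 : Nat) : Int) + 7 + 6) / 7
           = (PySem.Int.bitLength ((n / 128 : Nat) : Int) + 6) / 7 + 1 := by omega
      rw [he]; push_cast; ring

-- ===== VERDICT (by name: the statement is the Claim_ definition above) =====
theorem varint_size_py_spec : Claim_equal_varint_size_py := by
  intro value _
  unfold Spec_varint_size_py varint_size_py varint_size_py_alt
  by_cases h0 : value = 0
  · subst h0; decide
  · rw [if_neg h0, if_neg h0]
    by_cases hneg : value < 0
    · rw [if_pos hneg, varintLoopA, if_neg (by omega)]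
    · rw [if_neg hneg]
      have hpos : 0 < value := by omega
      obtain ⟨n, rfl⟩ : ∃ n : Nat, value = (n : Int) := ⟨value.toNat, (Int.toNat_of_nonneg (by omega)).symm⟩
      have hn : 0 < n := by exact_mod_cast hpos
      rw [loopA_eq n hn 0]
      have hcast : ((PySem.Int.bitLength (n : Int) : Int) + 6) = (((PySem.Int.bitLength (n : Int) + 6 : Nat)) : Int) := by push_cast; ring
      have hfd : PySem.Int.floordiv (((PySem.Int.bitLength (n : Int) + 6 : Nat)) : Int) 7
          = (((PySem.Int.bitLength (n : Int) + 6) / 7 : Nat) : Int) := by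
        exact_mod_cast PySem.Int.floordiv_natCast (PySem.Int.bitLength (n : Int) + 6) 7
      rw [hcast, hfd]; ring
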